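-- pv_equiv track=rewrite | github.com/flext-sh/flext-ldap | src/ldap_core_shared/utils/simple_dn_utils.py | simple_is_child_dn
-- ===== SOURCE A (Python) =====
-- def simple_parse_dn(dn_string: str) -> list[tuple[str, str]]:
--     """Simple DN parser that returns list of (attribute, value) tuples.
--
--     Args:
--         dn_string: DN string to parse
--
--     Returns:
--         List of (attribute, value) tuples
--
--     Raises:
--         ValueError: If DN format is invalid
--     """
--     if not dn_string or not dn_string.strip():
--         msg = "DN cannot be empty"
--         raise ValueError(msg)
--
--     components: list[tuple[str, str]] = []
--     # Simple DN parsing (would need more sophisticated parsing for complex cases)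
--     parts = [part.strip() for part in dn_string.split(",")]
--
--     for part in parts:
--         if "=" not in part:
--             msg = f"Invalid DN component: {part}"
--             raise ValueError(msg)
--
--         attr, value = part.split("=", 1)
--         components.append((attr.strip().lower(), value.strip()))
--
--     return components
--
-- def simple_is_child_dn(child_dn: str, parent_dn: str) -> bool:
--     """Check if one DN is a child of another (simple version).
--
--     Args:
--         child_dn: Potential child DN
--         parent_dn: Potential parent DN
--
--     Returns:
--         True if child_dn is a child of parent_dn
--     """
--     try:
--         child_components = simple_parse_dn(child_dn)
--         parent_components = simple_parse_dn(parent_dn)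
--
--         if len(child_components) <= len(parent_components):
--             return False
--
--         # Check if parent components match the end of child components
--         parent_start = len(child_components) - len(parent_components)
--         child_suffix = child_components[parent_start:]
--
--         for i, (p_attr, p_val) in enumerate(parent_components):
--             c_attr, c_val = child_suffix[i]
--             if p_attr.lower() != c_attr.lower() or p_val.lower() != c_val.lower():
--                 return False
--
--         return True
--     except ValueError:
--         return False
-- ===== SOURCE B (Python) =====
-- def _norm(part):
--     """Canonical (attr, value) key of one raw component, or None if it has no '='."""
--     attr, sep, value = part.strip().partition("=")
--     if not sep:
--         return None
--     return attr.strip().lower(), value.strip().lower()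
--
--
-- def _all_have_eq(s):
--     """Every comma-separated piece of s contains an '=' (checked right to left)."""
--     head, sep, last = s.rpartition(",")
--     if "=" not in last:
--         return False
--     return _all_have_eq(head) if sep else True
--
--
-- def _suffix_match(child, parent):
--     """Peel one component off the right of both strings, compare, recurse."""
--     c_head, c_sep, c_last = child.rpartition(",")
--     p_head, p_sep, p_last = parent.rpartition(",")
--     cn = _norm(c_last)
--     pn = _norm(p_last)
--     if cn is None or pn is None or cn != pn:
--         return False
--     if not p_sep:
--         return bool(c_sep) and _all_have_eq(c_head)
--     return bool(c_sep) and _suffix_match(c_head, p_head)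
--
--
-- def simple_is_child_dn(child_dn: str, parent_dn: str) -> bool:
--     if not child_dn.strip() or not parent_dn.strip():
--         return False
--     return _suffix_match(child_dn, parent_dn)
-- ===== Notes on version B (the rewrite author's own statement) =====
-- stated objective: alternative
-- what changed: B never builds parsed component lists: it recursively peels the last component off both raw strings with rpartition(','), compares one canonical (attr,value) key per step, and when the parent is exhausted only validates the remaining child head, instead of A's parse-both-DNs-into-lists, length arithmetic, slice and indexed comparison loop.
import Mathlib
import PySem

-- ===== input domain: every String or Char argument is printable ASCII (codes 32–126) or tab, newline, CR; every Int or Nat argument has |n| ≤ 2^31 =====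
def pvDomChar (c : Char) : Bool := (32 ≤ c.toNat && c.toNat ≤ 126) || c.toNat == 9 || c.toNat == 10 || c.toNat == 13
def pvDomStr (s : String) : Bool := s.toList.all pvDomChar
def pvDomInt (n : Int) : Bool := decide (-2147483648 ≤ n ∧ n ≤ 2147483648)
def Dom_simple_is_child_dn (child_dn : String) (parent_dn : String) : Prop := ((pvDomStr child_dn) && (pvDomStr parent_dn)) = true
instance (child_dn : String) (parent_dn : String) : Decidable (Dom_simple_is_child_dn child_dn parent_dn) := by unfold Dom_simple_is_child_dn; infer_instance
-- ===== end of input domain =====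

-- B replaces A's parse-both-DNs-into-component-lists + slice + indexed comparison loop by a
-- recursive right-to-left peel of the raw strings with rpartition(",") (objective: alternative).

-- ===== PORT A =====
-- the for-loop of simple_parse_dn (components built by append → structural recursion);
-- the `| _ => none` arm mirrors Python's unpacking ValueError (caught by the caller like the others)
def parsePartsA : List (List Char) → Option (List (List Char × List Char))
  | [] => some []
  | part :: rest =>
    if PySem.Chars.isIn ['='] part then
      match PySem.Chars.splitOnMax part ['='] 1 with
      | [attr, value] =>
        (parsePartsA rest).map (fun r => (PySem.Chars.lower (PySem.Chars.strip attr), PySem.Chars.strip value) :: r)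
      | _ => none
    else none

-- simple_parse_dn with `raise ValueError` rendered as none
def simpleParseDn (dn : List Char) : Option (List (List Char × List Char)) :=
  if dn = [] ∨ PySem.Chars.strip dn = [] then none
  else parsePartsA ((PySem.Chars.splitOn dn [',']).map PySem.Chars.strip)

-- `for i, (p_attr, p_val) in enumerate(parent_components)` indexing child_suffix[i]:
-- the [] arm is the (unreachable) IndexError of child_suffix[i]
def checkParentLoop : List (List Char × List Char) → List (List Char × List Char) → Bool
  | [], _ => true
  | (_, _) :: _, [] => false
  | (pa, pv) :: ps, (ca, cv) :: cs =>
    if PySem.Chars.lower pa != PySem.Chars.lower ca || PySem.Chars.lower pv != PySem.Chars.lower cv then false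
    else checkParentLoop ps cs

def simple_is_child_dn (child_dn : String) (parent_dn : String) : Bool :=
  match simpleParseDn child_dn.toList, simpleParseDn parent_dn.toList with
  | some c, some p =>
    if c.length ≤ p.length then false
    else
      checkParentLoop p (PySem.List.slice c (some ((c.length - p.length : Nat) : Int)) none)
  | _, _ => false

-- ===== PORT B =====
-- hand port of s.rpartition(","): the split is at the LAST comma (exact); rpartHead/rpartLast are
-- the pieces before/after it, and Python's `bool(sep)` is the `',' ∈ s` test at each use site
def rpartHead (s : List Char) : List Char := ((s.reverse.dropWhile (fun c => c != ',')).tail).reverse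
def rpartLast (s : List Char) : List Char := (s.reverse.takeWhile (fun c => c != ',')).reverse

-- `attr, sep, value = part.strip().partition("=")` ported by hand via the first '=' (exact)
def normB (part : List Char) : Option (List Char × List Char) :=
  let p := PySem.Chars.strip part
  let i := PySem.Chars.find p ['=']
  if i = -1 then none
  else some (PySem.Chars.lower (PySem.Chars.strip (p.take i.toNat)),
             PySem.Chars.lower (PySem.Chars.strip (p.drop (i.toNat + 1))))

theorem rpartHead_length_lt (s : List Char) (h : ',' ∈ s) : (rpartHead s).length < s.length := by
  unfold rpartHead
  have hne : s.reverse.dropWhile (fun c => c != ',') ≠ [] := by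
    rw [ne_eq, List.dropWhile_eq_nil_iff]
    push_neg
    exact ⟨',', by simpa using h, by simp⟩
  have h1 : (s.reverse.dropWhile (fun c => c != ',')).length ≤ s.length := by
    simpa using (List.dropWhile_sublist (l := s.reverse) (p := fun c => c != ',')).length_le
  have h2 : 0 < (s.reverse.dropWhile (fun c => c != ',')).length := List.length_pos_iff.mpr hne
  simp only [List.length_reverse, List.length_tail]
  omega

-- _all_have_eq: right-to-left recursion peeling the last component
def allEqB (s : List Char) : Bool :=
  if hp : ',' ∈ s then
    PySem.Chars.isIn ['='] (rpartLast s) && allEqB (rpartHead s)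
  else
    PySem.Chars.isIn ['='] s
termination_by s.length
decreasing_by exact rpartHead_length_lt s hp

-- _suffix_match: peel one component off the right of both strings, compare, recurse
def suffixB (child : List Char) (parent : List Char) : Bool :=
  if normB (rpartLast child) = none ∨ normB (rpartLast parent) = none ∨
      normB (rpartLast child) ≠ normB (rpartLast parent) then false
  else if hp : ',' ∈ parent then
    decide (',' ∈ child) && suffixB (rpartHead child) (rpartHead parent)
  else
    decide (',' ∈ child) && allEqB (rpartHead child)
termination_by parent.length
decreasing_by exact rpartHead_length_lt parent hp

def simple_is_child_dn_alt (child_dn : String) (parent_dn : String) : Bool :=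
  if PySem.Chars.strip child_dn.toList = [] ∨ PySem.Chars.strip parent_dn.toList = [] then false
  else suffixB child_dn.toList parent_dn.toList

-- ===== PRECONDITION & SPEC =====
def Spec_simple_is_child_dn (child_dn : String) (parent_dn : String) (out : Bool) : Prop := out = simple_is_child_dn_alt child_dn parent_dn
instance (child_dn : String) (parent_dn : String) (out : Bool) : Decidable (Spec_simple_is_child_dn child_dn parent_dn out) := by unfold Spec_simple_is_child_dn; infer_instance

-- ===== CLAIM (what is proved, stated in full; the proofs are below) =====
def Claim_equal_simple_is_child_dn : Prop := ∀ (child_dn : String) (parent_dn : String), Dom_simple_is_child_dn child_dn parent_dn → Spec_simple_is_child_dn child_dn parent_dn (simple_is_child_dn child_dn parent_dn)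

-- ===== LEMMAS AND PROOFS =====

-- structural comma split: the common yardstick both ports are measured against
def SC : List Char → List (List Char)
  | [] => [[]]
  | c :: t => if c = ',' then [] :: SC t else (SC t).modifyHead (fun h => c :: h)

-- canonical key sequence of a list of raw components (none = some component has no '=')
def keysOf : List (List Char) → Option (List (List Char × List Char))
  | [] => some []
  | q :: t =>
    match normB q with
    | none => none
    | some k => (keysOf t).map (k :: ·)

def toKey (x : List Char × List Char) : List Char × List Char :=
  (PySem.Chars.lower x.1, PySem.Chars.lower x.2)

theorem SC_ne_nil (l : List Char) : SC l ≠ [] := by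
  induction l with
  | nil => simp [SC]
  | cons c t ih =>
    simp only [SC]
    split
    · simp
    · cases h : SC t with
      | nil => exact absurd h ih
      | cons a b => simp [h]

theorem SC_length_pos (l : List Char) : 0 < (SC l).length :=
  List.length_pos_iff.mpr (SC_ne_nil l)

theorem goSO_eq (fuel : Nat) (l cur : List Char) (acc : List (List Char)) (h : l.length < fuel) :
    PySem.Chars.splitOn.go [','] fuel l cur acc = acc.reverse ++ (SC l).modifyHead (fun x => cur.reverse ++ x) := by
  induction fuel generalizing l cur acc with
  | zero => omega
  | succ n ih =>
    cases l with
    | nil => simp [PySem.Chars.splitOn.go, SC]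
    | cons c rest =>
      by_cases hc : c = ','
      · subst hc
        simp only [PySem.Chars.splitOn.go, List.isPrefixOf]
        rw [if_pos (by simp)]
        rw [show List.drop ([','] : List Char).length (',' :: rest) = rest from rfl]
        rw [ih rest [] (cur.reverse :: acc) (by simpa using h)]
        simp only [SC]
        cases SC rest <;> simp
      · simp only [PySem.Chars.splitOn.go]
        have hpf : ¬ ((([','] : List Char).isPrefixOf (c :: rest)) = true) := by
          simp [List.isPrefixOf]
          exact fun h => hc h.symm
        rw [if_neg hpf]
        rw [ih rest (c :: cur) acc (by simpa using h)]
        simp only [SC, if_neg hc]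
        cases hsc : SC rest with
        | nil => exact absurd hsc (SC_ne_nil rest)
        | cons x r => simp

theorem splitOn_eq_SC (dn : List Char) : PySem.Chars.splitOn dn [','] = SC dn := by
  refine Eq.trans (goSO_eq _ dn [] [] (by omega)) ?_
  cases hsc : SC dn with
  | nil => exact absurd hsc (SC_ne_nil dn)
  | cons x r => simp

theorem SC_no_comma (l : List Char) (h : ',' ∉ l) : SC l = [l] := by
  induction l with
  | nil => rfl
  | cons c t ih =>
    have hc : c ≠ ',' := fun hc => h (by simp [hc])
    have ht : ',' ∉ t := fun hm => h (by simp [hm])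
    simp [SC, hc, ih ht]

theorem SC_append (a b : List Char) : SC (a ++ ',' :: b) = SC a ++ SC b := by
  induction a with
  | nil => simp [SC]
  | cons c t ih =>
    by_cases hc : c = ','
    · simp [SC, hc, ih]
    · simp only [List.cons_append, SC, if_neg hc, ih]
      cases h : SC t with
      | nil => exact absurd h (SC_ne_nil t)
      | cons x r => simp

-- rpartition decomposition
theorem rpart_decomp (s : List Char) (h : ',' ∈ s) :
    s = rpartHead s ++ ',' :: rpartLast s ∧ ',' ∉ rpartLast s := by
  unfold rpartHead rpartLast
  have hne : s.reverse.dropWhile (fun c => c != ',') ≠ [] := by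
    rw [ne_eq, List.dropWhile_eq_nil_iff]
    push Not
    exact ⟨',', by simpa using h, by simp⟩
  have hhead : (s.reverse.dropWhile (fun c => c != ',')).head hne = ',' := by
    have := List.head_dropWhile_not (fun c => c != ',') hne
    simpa using this
  constructor
  · have hsplit : s.reverse =
        s.reverse.takeWhile (fun c => c != ',') ++ (',' :: (s.reverse.dropWhile (fun c => c != ',')).tail) := by
      conv_lhs => rw [← List.takeWhile_append_dropWhile (p := fun c => c != ',') (l := s.reverse)]
      congr 1
      conv_lhs => rw [← List.cons_head_tail hne]
      rw [hhead]
    conv_lhs => rw [← List.reverse_reverse s, hsplit]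
    simp
  · intro hc
    have := List.mem_takeWhile_imp (List.mem_reverse.mp hc)
    simp at this

theorem rpartLast_no_comma (s : List Char) (h : ',' ∉ s) : rpartLast s = s := by
  unfold rpartLast
  rw [List.takeWhile_eq_self_iff.mpr, List.reverse_reverse]
  intro a ha
  simp only [bne_iff_ne, ne_eq]
  exact fun hc => h (List.mem_reverse.mp (hc ▸ ha))

-- characters and strip
theorem char_toNat_inj (c d : Char) : c = d ↔ c.toNat = d.toNat :=
  ⟨fun h => h ▸ rfl, fun h => Char.ext (UInt32.toNat_inj.mp h)⟩

theorem isupper_iff (c : Char) : PySem.Chars.isupper c = true ↔ 65 ≤ c.toNat ∧ c.toNat ≤ 90 := by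
  unfold PySem.Chars.isupper
  rw [Bool.and_eq_true, decide_eq_true_iff, decide_eq_true_iff]
  constructor
  · rintro ⟨h1, h2⟩
    exact ⟨UInt32.le_iff_toNat_le.mp (Char.le_def.mp h1), UInt32.le_iff_toNat_le.mp (Char.le_def.mp h2)⟩
  · rintro ⟨h1, h2⟩
    exact ⟨Char.le_def.mpr (UInt32.le_iff_toNat_le.mpr h1), Char.le_def.mpr (UInt32.le_iff_toNat_le.mpr h2)⟩

theorem toNat_lowerChar (c : Char) :
    (PySem.Chars.lowerChar c).toNat = if 65 ≤ c.toNat ∧ c.toNat ≤ 90 then c.toNat + 32 else c.toNat := by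
  unfold PySem.Chars.lowerChar
  by_cases h : PySem.Chars.isupper c = true
  · have := (isupper_iff c).mp h
    rw [if_pos h, if_pos this, Char.toNat_ofNat]
    have : c.toNat ≤ 90 := this.2
    simp [Nat.isValidChar]
    omega
  · rw [if_neg h, if_neg (fun hh => h ((isupper_iff c).mpr hh))]

theorem lc_idem (c : Char) : PySem.Chars.lowerChar (PySem.Chars.lowerChar c) = PySem.Chars.lowerChar c := by
  rw [char_toNat_inj, toNat_lowerChar, toNat_lowerChar]
  split_ifs <;> omega

theorem lower_idem (a : List Char) : PySem.Chars.lower (PySem.Chars.lower a) = PySem.Chars.lower a := by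
  simp [PySem.Chars.lower, Function.comp, lc_idem]

theorem mem_eq_dropWhile (m : List Char) :
    '=' ∈ m.dropWhile PySem.Chars.isspace ↔ '=' ∈ m := by
  constructor
  · exact fun h => (List.dropWhile_sublist _).subset h
  · intro h
    conv at h => rw [← List.takeWhile_append_dropWhile (p := PySem.Chars.isspace) (l := m)]
    rcases List.mem_append.mp h with h1 | h1
    · have := List.mem_takeWhile_imp h1
      exact absurd this (by decide)
    · exact h1

theorem mem_eq_strip (l : List Char) : '=' ∈ PySem.Chars.strip l ↔ '=' ∈ l := by
  unfold PySem.Chars.strip PySem.Chars.rstrip PySem.Chars.lstrip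
  simp [List.mem_reverse, mem_eq_dropWhile]

-- split("=", 1)
theorem go0_eq (fuel : Nat) (l cur : List Char) (acc : List (List Char)) :
    PySem.Chars.splitOnMax.go ['='] fuel 0 l cur acc = ((cur.reverse ++ l) :: acc).reverse := by
  cases fuel with
  | zero => rfl
  | succ n => cases l with
    | nil => simp [PySem.Chars.splitOnMax.go]
    | cons c rest => simp [PySem.Chars.splitOnMax.go]

theorem go1_eq (fuel : Nat) (l cur : List Char) (acc : List (List Char)) (h : l.length < fuel) :
    PySem.Chars.splitOnMax.go ['='] fuel 1 l cur acc =
      if '=' ∈ l then acc.reverse ++ [cur.reverse ++ l.takeWhile (fun c => c != '='), (l.dropWhile (fun c => c != '=')).tail]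
      else acc.reverse ++ [cur.reverse ++ l] := by
  induction fuel generalizing l cur acc with
  | zero => omega
  | succ n ih =>
    cases l with
    | nil => simp [PySem.Chars.splitOnMax.go]
    | cons c rest =>
      by_cases hc : c = '='
      · subst hc
        simp [PySem.Chars.splitOnMax.go, List.isPrefixOf, go0_eq]
      · have hr : rest.length < n := by simpa using h
        simp only [PySem.Chars.splitOnMax.go, List.isPrefixOf]
        have : (('=' == c) && true) = false := by simp [Ne.symm hc]
        rw [if_neg (by omega), if_neg (by simp [this])]
        rw [ih rest (c :: cur) acc hr]
        by_cases hm : '=' ∈ rest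
        · simp [hm, hc, Ne.symm hc]
        · simp [hm, Ne.symm hc]

theorem splitOnMax_eq (l : List Char) :
    PySem.Chars.splitOnMax l ['='] 1 =
      if '=' ∈ l then [l.takeWhile (fun c => c != '='), (l.dropWhile (fun c => c != '=')).tail]
      else [l] := by
  unfold PySem.Chars.splitOnMax
  rw [if_neg (by norm_num)]
  have : (1 : Int).toNat = 1 := rfl
  rw [this, go1_eq l.length.succ l [] [] (by omega)]
  by_cases hm : '=' ∈ l <;> simp [hm]

-- find / isIn on a single character
theorem singleton_prefix_iff (c : Char) (l : List Char) : [c] <+: l ↔ ∃ t, l = c :: t := by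
  cases l with
  | nil => simp
  | cons d t =>
    rw [show ([c] : List Char) = c :: [] from rfl, List.cons_prefix_cons]
    constructor
    · rintro ⟨rfl, _⟩; exact ⟨t, rfl⟩
    · rintro ⟨t', ht⟩; cases ht; exact ⟨rfl, by simp⟩

theorem singleton_infix_iff (c : Char) (l : List Char) : [c] <:+: l ↔ c ∈ l := by
  constructor
  · intro h; exact h.subset (by simp)
  · intro h
    obtain ⟨s, t, rfl⟩ := List.append_of_mem h
    exact ⟨s, t, by simp⟩

theorem isIn_eq_mem (part : List Char) : PySem.Chars.isIn ['='] part = true ↔ '=' ∈ part := by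
  rw [show PySem.Chars.isIn ['='] part = (PySem.Chars.find part ['='] != -1) from rfl]
  rw [bne_iff_ne, PySem.Chars.find_ne_neg_one_iff, singleton_infix_iff]

theorem find_of_mem (part : List Char) (hm : '=' ∈ part) :
    PySem.Chars.find part ['='] = ((part.takeWhile (fun c => c != '=')).length : Int) := by
  set k := (part.takeWhile (fun c => c != '=')).length with hk
  have htw : part.takeWhile (fun c => c != '=') = part.take k := by
    rw [hk]
    exact List.prefix_iff_eq_take.mp (List.takeWhile_prefix _)
  have hdw : part.drop k = part.dropWhile (fun c => c != '=') := by
    conv_lhs => rw [← List.takeWhile_append_dropWhile (p := fun c => c != '=') (l := part), hk]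
    exact List.drop_left
  have hne : part.dropWhile (fun c => c != '=') ≠ [] := by
    rw [ne_eq, List.dropWhile_eq_nil_iff]
    push Not
    exact ⟨'=', hm, by simp⟩
  have hhead : ((part.dropWhile (fun c => c != '=')).head hne) = '=' := by
    have := List.head_dropWhile_not (fun c => c != '=') hne
    simpa using this
  have hb : ['='] <+: part.drop k := by
    rw [hdw, singleton_prefix_iff]
    have hct := List.cons_head_tail hne
    rw [hhead] at hct
    exact ⟨(part.dropWhile (fun c => c != '=')).tail, hct.symm⟩
  have hc : ∀ j < k, ¬ ['='] <+: part.drop j := by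
    intro j hj hpre
    obtain ⟨t, ht⟩ := (singleton_prefix_iff _ _).mp hpre
    have hjlen : j < part.length := by
      have := (List.takeWhile_prefix (l := part) (p := fun c => c != '=')).length_le
      omega
    have hget : part[j] = '=' := by
      have : (part.drop j).head? = some '=' := by rw [ht]; rfl
      rw [List.head?_drop] at this
      simpa [List.getElem?_eq_getElem hjlen] using this
    have hmem : part[j] ∈ part.takeWhile (fun c => c != '=') := by
      rw [htw]
      have hjk : j < (part.take k).length := by
        simp only [List.length_take]
        omega
      rw [show part[j] = (part.take k)[j] from (List.getElem_take (xs := part)).symm]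
      exact List.getElem_mem hjk
    have := List.mem_takeWhile_imp hmem
    simp [hget] at this
  have h0 : 0 ≤ PySem.Chars.find part ['='] := by
    rw [PySem.Chars.find_nonneg_iff, singleton_infix_iff]; exact hm
  obtain ⟨H1, H2⟩ := PySem.Chars.find_spec (s := part) (sub := ['=']) h0
  have : (PySem.Chars.find part ['=']).toNat = k := by
    by_contra hne2
    rcases Nat.lt_or_ge (PySem.Chars.find part ['=']).toNat k with hlt | hge
    · exact hc _ hlt H1
    · have : k < (PySem.Chars.find part ['=']).toNat := by omega
      exact H2 k this hb
  omega

theorem find_neg_iff (part : List Char) : PySem.Chars.find part ['='] = -1 ↔ '=' ∉ part := by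
  rw [PySem.Chars.find_eq_neg_one_iff, singleton_infix_iff]

theorem tw_take (part : List Char) :
    part.take (part.takeWhile (fun c => c != '=')).length = part.takeWhile (fun c => c != '=') :=
  (List.prefix_iff_eq_take.mp (List.takeWhile_prefix _)).symm

theorem dw_drop (part : List Char) :
    part.drop ((part.takeWhile (fun c => c != '=')).length + 1) = (part.dropWhile (fun c => c != '=')).tail := by
  rw [← List.tail_drop]
  congr 1
  have hsplit : part = part.takeWhile (fun c => c != '=') ++ part.dropWhile (fun c => c != '=') :=
    (List.takeWhile_append_dropWhile).symm
  calc part.drop (part.takeWhile (fun c => c != '=')).length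
      = (part.takeWhile (fun c => c != '=') ++ part.dropWhile (fun c => c != '=')).drop
          (part.takeWhile (fun c => c != '=')).length := by rw [← hsplit]
    _ = part.dropWhile (fun c => c != '=') := List.drop_left

-- normB characterizations
theorem normB_none_iff (q : List Char) : normB q = none ↔ '=' ∉ q := by
  unfold normB
  simp only []
  rw [← mem_eq_strip]
  by_cases h : PySem.Chars.find (PySem.Chars.strip q) ['='] = -1
  · simp [h, (find_neg_iff _).mp h]
  · have hm : '=' ∈ PySem.Chars.strip q := by
      by_contra hc
      exact h ((find_neg_iff _).mpr hc)
    simp [h, hm]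

theorem normB_of_mem (q : List Char) (hm : '=' ∈ PySem.Chars.strip q) :
    normB q = some
      (PySem.Chars.lower (PySem.Chars.strip ((PySem.Chars.strip q).takeWhile (fun c => c != '='))),
       PySem.Chars.lower (PySem.Chars.strip (((PySem.Chars.strip q).dropWhile (fun c => c != '=')).tail))) := by
  unfold normB
  simp only []
  rw [find_of_mem _ hm]
  rw [if_neg (by omega)]
  have htn : (((((PySem.Chars.strip q).takeWhile (fun c => c != '=')).length : Nat) : Int)).toNat
      = ((PySem.Chars.strip q).takeWhile (fun c => c != '=')).length := by omega
  rw [htn, tw_take, dw_drop]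

-- keysOf lemmas
theorem keysOf_length (l : List (List Char)) : ∀ K, keysOf l = some K → K.length = l.length := by
  induction l with
  | nil => intro K h; simp [keysOf] at h; simp [← h]
  | cons q t ih =>
    intro K h
    simp only [keysOf] at h
    cases hn : normB q with
    | none => rw [hn] at h; simp at h
    | some k =>
      rw [hn] at h
      cases hk : keysOf t with
      | none => rw [hk] at h; simp at h
      | some K' =>
        rw [hk] at h
        simp only [Option.map_some, Option.some.injEq] at h
        subst h
        simp [ih K' hk]

theorem keysOf_snoc (xs : List (List Char)) (q : List Char) :
    keysOf (xs ++ [q]) = (keysOf xs).bind (fun K => (normB q).map (fun k => K ++ [k])) := by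
  induction xs with
  | nil =>
    simp only [List.nil_append, keysOf]
    cases hn : normB q <;> simp [keysOf]
  | cons x t ih =>
    simp only [List.cons_append, keysOf, ih]
    cases hx : normB x with
    | none => simp
    | some k =>
      cases hk : keysOf t with
      | none => simp
      | some K =>
        cases hn : normB q <;> simp

-- parse-side characterization: A's parsed components, seen through toKey, are keysOf
theorem parseA_keys (l : List (List Char)) :
    (parsePartsA (l.map PySem.Chars.strip)).map (List.map toKey) = keysOf l := by
  induction l with
  | nil => simp [parsePartsA, keysOf]
  | cons q t ih =>
    simp only [List.map_cons, parsePartsA, keysOf]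
    by_cases hm : '=' ∈ PySem.Chars.strip q
    · rw [if_pos ((isIn_eq_mem _).mpr hm), splitOnMax_eq _, if_pos hm, normB_of_mem q hm]
      cases hp : parsePartsA (t.map PySem.Chars.strip) with
      | none =>
        rw [hp] at ih
        simp only [Option.map_none] at ih
        simp [← ih]
      | some r =>
        rw [hp] at ih
        simp only [Option.map_some] at ih
        simp only [← ih, Option.map_some]
        simp [toKey, lower_idem]
    · have hfalse : PySem.Chars.isIn ['='] (PySem.Chars.strip q) = false := by
        rw [← Bool.not_eq_true]
        simp only [isIn_eq_mem]
        exact hm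
      rw [if_neg (by simp [hfalse])]
      have hq : normB q = none := (normB_none_iff q).mpr (fun hc => hm ((mem_eq_strip q).mpr hc))
      simp [hq]

-- the comparison loop computes key-list equality
theorem checkLoop_key (P : List (List Char × List Char)) : ∀ T, T.length = P.length →
    checkParentLoop P T = decide (T.map toKey = P.map toKey) := by
  induction P with
  | nil =>
    intro T hl
    cases T with
    | nil => simp [checkParentLoop]
    | cons a ts => simp at hl
  | cons q ps ih =>
    intro T hl
    obtain ⟨pa, pv⟩ := q
    cases T with
    | nil => simp at hl
    | cons q' ts =>
      obtain ⟨ca, cv⟩ := q'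
      simp only [checkParentLoop, List.map_cons]
      by_cases h1 : PySem.Chars.lower pa = PySem.Chars.lower ca
      · by_cases h2 : PySem.Chars.lower pv = PySem.Chars.lower cv
        · rw [if_neg (by simp [h1, h2])]
          rw [ih ts (by simpa using hl)]
          simp [toKey, h1, h2]
        · rw [if_pos (by simp [h2])]
          refine (decide_eq_false ?_).symm
          intro hc
          simp only [List.cons.injEq, Prod.mk.injEq, toKey] at hc
          exact h2 hc.1.2.symm
      · rw [if_pos (by simp [h1])]
        refine (decide_eq_false ?_).symm
        intro hc
        simp only [List.cons.injEq, Prod.mk.injEq, toKey] at hc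
        exact h1 hc.1.1.symm

-- suffix lemmas
theorem snoc_suffix (xs ys : List (List Char × List Char)) (x y : List Char × List Char) :
    (xs ++ [x]) <:+ (ys ++ [y]) ↔ x = y ∧ xs <:+ ys := by
  rw [← List.reverse_prefix]
  simp only [List.reverse_append, List.reverse_cons, List.reverse_nil, List.nil_append,
    List.cons_append, List.singleton_append]
  rw [List.cons_prefix_cons, List.reverse_prefix]

-- A characterized through keysOf + suffix
theorem strip_nil : PySem.Chars.strip ([] : List Char) = [] := by decide

theorem parse_none_of_strip_nil (dn : List Char) (h : PySem.Chars.strip dn = []) :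
    simpleParseDn dn = none := by
  unfold simpleParseDn
  rw [if_pos (Or.inr h)]

theorem parse_keys (dn : List Char) (h : PySem.Chars.strip dn ≠ []) :
    (simpleParseDn dn).map (List.map toKey) = keysOf (SC dn) := by
  unfold simpleParseDn
  rw [if_neg (by rintro (rfl | h2); exacts [h strip_nil, h h2]), splitOn_eq_SC, parseA_keys]

theorem suffix_eq_drop {α : Type} (P C : List α) (hlt : P.length < C.length) :
    (C.drop (C.length - P.length) = P) ↔ P <:+ C := by
  constructor
  · intro he
    rw [← he]
    exact List.drop_suffix _ _
  · rintro ⟨t, ht⟩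
    rw [← ht]
    have hl : (t ++ P).length - P.length = t.length := by simp
    rw [hl, List.drop_left]

theorem A_char (c p : String) :
    simple_is_child_dn c p =
      if PySem.Chars.strip c.toList = [] ∨ PySem.Chars.strip p.toList = [] then false
      else
        match keysOf (SC c.toList), keysOf (SC p.toList) with
        | some KC, some KP => decide (KP.length < KC.length ∧ KP <:+ KC)
        | _, _ => false := by
  by_cases h : PySem.Chars.strip c.toList = [] ∨ PySem.Chars.strip p.toList = []
  · rw [if_pos h]
    rcases h with h | h
    · simp [simple_is_child_dn, parse_none_of_strip_nil _ h]
    · cases hcp : simpleParseDn c.toList <;>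
        simp [simple_is_child_dn, parse_none_of_strip_nil _ h, hcp]
  · rw [if_neg h]
    push Not at h
    obtain ⟨hcne, hpne⟩ := h
    have HC := parse_keys c.toList hcne
    have HP := parse_keys p.toList hpne
    cases hcp : simpleParseDn c.toList with
    | none =>
      rw [hcp] at HC
      simp only [Option.map_none] at HC
      cases hkp : keysOf (SC p.toList) <;> simp [simple_is_child_dn, hcp, ← HC]
    | some C =>
      rw [hcp] at HC
      simp only [Option.map_some] at HC
      cases hpp : simpleParseDn p.toList with
      | none =>
        rw [hpp] at HP
        simp only [Option.map_none] at HP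
        simp [simple_is_child_dn, hcp, hpp, ← HC, ← HP]
      | some P =>
        rw [hpp] at HP
        simp only [Option.map_some] at HP
        simp only [simple_is_child_dn, hcp, hpp, ← HC, ← HP]
        by_cases hlen : C.length ≤ P.length
        · rw [if_pos hlen]
          have : ¬ ((List.map toKey P).length < (List.map toKey C).length) := by
            simp only [List.length_map]; omega
          simp only [List.length_map]
          simp [this]
          exact fun h => absurd h (by omega)
        · rw [if_neg hlen]
          have hlt : P.length < C.length := by omega
          rw [PySem.List.slice_from_natCast,
            checkLoop_key P _ (by simp only [List.length_drop]; omega)]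
          have hlt' : (List.map toKey P).length < (List.map toKey C).length := by
            simp only [List.length_map]; omega
          rw [Bool.eq_iff_iff]
          simp only [decide_eq_true_iff]
          rw [List.map_drop]
          have hd : C.length - P.length = (List.map toKey C).length - (List.map toKey P).length := by
            simp
          rw [hd, suffix_eq_drop _ _ hlt']
          exact ⟨fun he => ⟨hlt', he⟩, fun h => h.2⟩

-- B's validity scan
theorem keysOf_single (q : List Char) : keysOf [q] = (normB q).map (fun k => [k]) := by
  cases hn : normB q <;> simp [keysOf, hn]

theorem keysOf_SC_comma (s : List Char) (h : ',' ∈ s) :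
    keysOf (SC s) = (keysOf (SC (rpartHead s))).bind
      (fun K => (normB (rpartLast s)).map (fun k => K ++ [k])) := by
  obtain ⟨hdec, hnc⟩ := rpart_decomp s h
  conv_lhs => rw [hdec]
  rw [SC_append, SC_no_comma _ hnc, keysOf_snoc]

theorem keysOf_SC_nocomma (s : List Char) (h : ',' ∉ s) :
    keysOf (SC s) = (normB s).map (fun k => [k]) := by
  rw [SC_no_comma s h, keysOf_single]

theorem isIn_of_norm_some (q : List Char) {k : List Char × List Char} (h : normB q = some k) :
    PySem.Chars.isIn ['='] q = true := by
  rw [isIn_eq_mem]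
  by_contra hc
  rw [(normB_none_iff q).mpr hc] at h
  simp at h

theorem isIn_of_norm_none (q : List Char) (h : normB q = none) :
    PySem.Chars.isIn ['='] q = false := by
  rw [← Bool.not_eq_true, isIn_eq_mem]
  exact (normB_none_iff q).mp h

theorem allEq_char (s : List Char) : allEqB s = (keysOf (SC s)).isSome := by
  by_cases hp : ',' ∈ s
  · rw [allEqB, dif_pos hp, keysOf_SC_comma s hp, allEq_char (rpartHead s)]
    cases hn : normB (rpartLast s) with
    | none =>
      rw [isIn_of_norm_none _ hn]
      cases keysOf (SC (rpartHead s)) <;> simp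
    | some k =>
      rw [isIn_of_norm_some _ hn]
      cases keysOf (SC (rpartHead s)) <;> simp
  · rw [allEqB, dif_neg hp, keysOf_SC_nocomma s hp]
    cases hn : normB s with
    | none => rw [isIn_of_norm_none _ hn]; simp
    | some k => rw [isIn_of_norm_some _ hn]; simp
termination_by s.length
decreasing_by exact rpartHead_length_lt s hp

-- B's peel recursion computes the same suffix condition
theorem singleton_suffix_snoc (KCh : List (List Char × List Char)) (pn cn : List Char × List Char) :
    ([pn] <:+ (KCh ++ [cn])) ↔ pn = cn := by
  have := snoc_suffix [] KCh pn cn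
  simp only [List.nil_append] at this
  rw [this]
  simp

theorem keysOf_SC_pos (s : List Char) {K : List (List Char × List Char)}
    (h : keysOf (SC s) = some K) : 0 < K.length := by
  rw [keysOf_length _ K h]
  exact SC_length_pos s

theorem suffix_char (parent child : List Char) :
    suffixB child parent =
      match keysOf (SC child), keysOf (SC parent) with
      | some KC, some KP => decide (KP.length < KC.length ∧ KP <:+ KC)
      | _, _ => false := by
  rw [suffixB.eq_def]
  by_cases hpp : ',' ∈ parent
  · rw [keysOf_SC_comma parent hpp]
    cases hpn : normB (rpartLast parent) with
    | none =>
      rw [if_pos (by simp)]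
      cases keysOf (SC child) <;> cases keysOf (SC (rpartHead parent)) <;> simp
    | some pn =>
      cases hkp : keysOf (SC (rpartHead parent)) with
      | none =>
        have IH := suffix_char (rpartHead parent) (rpartHead child)
        rw [hkp] at IH
        cases hcn : normB (rpartLast child) with
        | none =>
          rw [if_pos (by simp)]
          cases keysOf (SC child) <;> simp
        | some cn =>
          by_cases heq : cn = pn
          · rw [if_neg (by simp [heq]), dif_pos hpp, IH]
            cases hkc : keysOf (SC (rpartHead child)) with
            | none =>
              simp only [Option.bind_none]
              cases keysOf (SC child) <;> simp
            | some KCh =>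
              simp only [Option.bind_none]
              cases keysOf (SC child) <;> simp
          · rw [if_pos (by simp [heq])]
            cases keysOf (SC child) <;> simp
      | some KPh =>
        simp only [Option.bind_some, Option.map_some]
        by_cases hcc : ',' ∈ child
        · rw [keysOf_SC_comma child hcc]
          cases hcn : normB (rpartLast child) with
          | none =>
            rw [if_pos (by simp)]
            cases keysOf (SC (rpartHead child)) <;> simp
          | some cn =>
            by_cases heq : cn = pn
            · subst heq
              rw [if_neg (by simp), dif_pos hpp]
              have IH := suffix_char (rpartHead parent) (rpartHead child)
              rw [hkp] at IH
              cases hkc : keysOf (SC (rpartHead child)) with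
              | none =>
                rw [hkc] at IH
                simp [hcc, IH]
              | some KCh =>
                rw [hkc] at IH
                simp only [Option.bind_some, Option.map_some, hcc,
                  decide_true, Bool.true_and, IH]
                rw [Bool.eq_iff_iff]
                simp only [decide_eq_true_iff]
                rw [snoc_suffix]
                constructor
                · rintro ⟨h1, h2⟩
                  refine ⟨by simp only [List.length_append, List.length_cons, List.length_nil]; omega,
                    rfl, h2⟩
                · rintro ⟨h1, -, h2⟩
                  refine ⟨?_, h2⟩
                  simp only [List.length_append, List.length_cons, List.length_nil] at h1
                  omega
            · rw [if_pos (by simp [heq])]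
              cases hkc : keysOf (SC (rpartHead child)) with
              | none => simp
              | some KCh =>
                simp only [Option.bind_some, Option.map_some]
                refine Eq.symm (decide_eq_false ?_)
                rintro ⟨-, h2⟩
                rw [snoc_suffix] at h2
                exact heq h2.1.symm
        · rw [keysOf_SC_nocomma child hcc, rpartLast_no_comma child hcc]
          cases hcn : normB child with
          | none =>
            rw [if_pos (by simp)]
            simp
          | some cn =>
            simp only [Option.map_some]
            have hfalse : ¬ ((KPh ++ [pn]).length < ([cn] : List (List Char × List Char)).length) := by
              simp only [List.length_append, List.length_cons, List.length_nil]
              omega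
            by_cases heq : cn = pn
            · rw [if_neg (by simp [heq]), dif_pos hpp]
              simp [hcc, hfalse]
            · rw [if_pos (by simp [heq])]
              simp [hfalse]
  · rw [keysOf_SC_nocomma parent hpp, rpartLast_no_comma parent hpp]
    cases hpn : normB parent with
    | none =>
      rw [if_pos (by simp)]
      cases keysOf (SC child) <;> simp
    | some pn =>
      simp only [Option.map_some]
      by_cases hcc : ',' ∈ child
      · rw [keysOf_SC_comma child hcc]
        cases hcn : normB (rpartLast child) with
        | none =>
          rw [if_pos (by simp)]
          cases keysOf (SC (rpartHead child)) <;> simp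
        | some cn =>
          by_cases heq : cn = pn
          · subst heq
            rw [if_neg (by simp), dif_neg hpp, allEq_char]
            cases hkc : keysOf (SC (rpartHead child)) with
            | none => simp [hcc]
            | some KCh =>
              have hpos := keysOf_SC_pos (rpartHead child) hkc
              simp only [Option.bind_some, Option.map_some, Option.isSome_some, hcc,
                decide_true, Bool.true_and]
              refine Eq.symm (decide_eq_true ?_)
              refine ⟨?_, ?_⟩
              · simp only [List.length_append, List.length_cons, List.length_nil]
                omega
              · rw [singleton_suffix_snoc]
          · rw [if_pos (by simp [heq])]
            cases hkc : keysOf (SC (rpartHead child)) with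
            | none => simp
            | some KCh =>
              simp only [Option.bind_some, Option.map_some]
              refine Eq.symm (decide_eq_false ?_)
              rintro ⟨-, h2⟩
              rw [singleton_suffix_snoc] at h2
              exact heq h2.symm
      · rw [keysOf_SC_nocomma child hcc, rpartLast_no_comma child hcc]
        cases hcn : normB child with
        | none =>
          rw [if_pos (by simp)]
          simp
        | some cn =>
          simp only [Option.map_some]
          by_cases heq : cn = pn
          · rw [if_neg (by simp [heq]), dif_neg hpp]
            simp [hcc]
          · rw [if_pos (by simp [heq])]
            simp
termination_by parent.length
decreasing_by all_goals exact rpartHead_length_lt parent hpp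

-- ===== VERDICT (by name: the statement is the Claim_ definition above) =====
theorem simple_is_child_dn_spec : Claim_equal_simple_is_child_dn := by
  intro child parent _
  unfold Spec_simple_is_child_dn simple_is_child_dn_alt
  rw [A_char]
  by_cases h : PySem.Chars.strip child.toList = [] ∨ PySem.Chars.strip parent.toList = []
  · rw [if_pos h, if_pos h]
  · rw [if_neg h, if_neg h, suffix_char]
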